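-- pv_equiv track=rewrite | github.com/marouane11119999/bachelor | CovidDataIntegrator/python/dash/helpers/files_processing.py | further_processing
-- ===== SOURCE A (Python) =====
-- def further_processing(instances: dict) -> dict:
--     final_list = {k: v.split()[1:] for k, v in instances.items()}
--     final_list = {k: ' '.join(v) for k, v in final_list.items()}
--
--     final_list = {k: [ll.split("'")[i] for i in range(len(ll.split("'"))) if i % 2 != 0] for k, ll in
--                   final_list.items()}
--     final_list = {k: [liste[i] for i in range(len(liste)) if i % 2 != 0] for k, liste in final_list.items()}
--     key_list = list(final_list.keys())
--     for i in range(len(key_list)):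
--         if all(item == "" for item in final_list[key_list[i]]):
--             final_list[key_list[i]] = final_list[key_list[i - 1]]
--     return final_list
-- ===== SOURCE B (Python) =====
-- def further_processing(instances: dict) -> dict:
--     result = {}
--     for k, v in instances.items():
--         result[k] = ' '.join(v.split()[1:]).split("'")[3::4]
--     keys = list(result)
--     if keys:
--         prev = result[keys[-1]]
--         for k in keys:
--             if all(item == "" for item in result[k]):
--                 result[k] = prev
--             prev = result[k]
--     return result
-- ===== Notes on version B (the rewrite author's own statement) =====
-- stated objective: simpler
-- what changed: Replaces A's four successive dict-comprehension passes (split/join then two separate odd-index filters) with a single pass computing parts[3::4] per key, and replaces A's index loop with negative-index wraparound lookups by one forward fold that carries the previous key's value.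
import Mathlib
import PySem

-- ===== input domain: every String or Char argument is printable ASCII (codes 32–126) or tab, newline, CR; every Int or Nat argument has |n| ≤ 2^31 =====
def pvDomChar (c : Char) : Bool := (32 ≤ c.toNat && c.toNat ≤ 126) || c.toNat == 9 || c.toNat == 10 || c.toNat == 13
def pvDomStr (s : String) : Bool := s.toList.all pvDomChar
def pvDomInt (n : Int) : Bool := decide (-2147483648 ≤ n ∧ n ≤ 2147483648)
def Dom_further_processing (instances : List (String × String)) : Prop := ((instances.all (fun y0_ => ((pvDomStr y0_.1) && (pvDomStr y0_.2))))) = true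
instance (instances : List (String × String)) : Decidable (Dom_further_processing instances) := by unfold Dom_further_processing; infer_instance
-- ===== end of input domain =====

-- B replaces A's four dict-comprehension passes (two successive odd-index filters) by one pass
-- taking parts[3::4] per key, and replaces A's index loop with negative-index wraparound lookups
-- by a single forward fold carrying the previous key's value (objective: simpler).

-- dict get / set for a dict represented as an association list with distinct keys (Pre_);
-- both Pythons use the same dict lookup/assignment, so both ports share these two helpers.
def pvGetV (st : List (String × List String)) (k : String) : List String :=
  ((st.find? (fun p => p.1 == k)).map (fun p => p.2)).getD []

def pvSetV (st : List (String × List String)) (k : String) (v : List String) :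
    List (String × List String) :=
  st.map (fun p => if p.1 == k then (k, v) else p)

-- ===== PORT A =====
def further_processing (instances : List (String × String)) : List (String × List String) :=
  let fl1 := instances.map (fun kv => (kv.1, PySem.List.slice (PySem.Str.split₀ kv.2) (some 1) none))
  let fl2 := fl1.map (fun kv => (kv.1, PySem.Str.join " " kv.2))
  let fl3 := fl2.map (fun kv =>
    let parts := (PySem.Str.split? kv.2 "'").getD []   -- sep "'" ≠ "", so split? is some
    (kv.1, ((PySem.List.pyRange 0 (parts.length : Int) 1).filter
        (fun i => PySem.Int.mod i 2 != 0)).map (fun i => PySem.List.pyGetD parts i "")))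
  let fl4 := fl3.map (fun kv =>
    (kv.1, ((PySem.List.pyRange 0 (kv.2.length : Int) 1).filter
        (fun i => PySem.Int.mod i 2 != 0)).map (fun i => PySem.List.pyGetD kv.2 i "")))
  let key_list := fl4.map Prod.fst
  (PySem.List.pyRange 0 (key_list.length : Int) 1).foldl (fun st i =>
    if (pvGetV st (PySem.List.pyGetD key_list i "")).all (fun item => item == "") then
      pvSetV st (PySem.List.pyGetD key_list i "")
        (pvGetV st (PySem.List.pyGetD key_list (i - 1) ""))
    else st) fl4

-- ===== PORT B =====
def further_processing_alt (instances : List (String × String)) : List (String × List String) :=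
  let result := instances.map (fun kv =>
    let parts := (PySem.Str.split? (PySem.Str.join " "
        (PySem.List.slice (PySem.Str.split₀ kv.2) (some 1) none)) "'").getD []
    (kv.1, (PySem.List.slice? parts (some 3) none 4).getD []))   -- step 4 ≠ 0, so slice? is some
  let keys := result.map Prod.fst
  match keys.getLast? with
  | none => result
  | some lk =>
    (keys.foldl (fun sp k =>
      if (pvGetV sp.1 k).all (fun item => item == "") then (pvSetV sp.1 k sp.2, sp.2)
      else (sp.1, pvGetV sp.1 k)) (result, pvGetV result lk)).1

-- ===== PRECONDITION & SPEC =====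
-- Pre_ excludes association lists with duplicate keys: they do not represent a Python dict
-- (dict(pairs) collapses duplicates), so A's behaviour on them is not defined by the source.
def Pre_further_processing (instances : List (String × String)) : Prop :=
  (instances.map Prod.fst).Nodup
instance (instances : List (String × String)) : Decidable (Pre_further_processing instances) := by
  unfold Pre_further_processing; infer_instance

def pvWitness_further_processing : (List (String × String)) :=
  [("a", "x 'p' q 'r' s 't' u 'w'"), ("b", "y")]

def Spec_further_processing (instances : List (String × String)) (out : List (String × List String)) : Prop := out = further_processing_alt instances
instance (instances : List (String × String)) (out : List (String × List String)) : Decidable (Spec_further_processing instances out) := by unfold Spec_further_processing; infer_instance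

-- ===== CLAIM (what is proved, stated in full; the proofs are below) =====
def Claim_equal_further_processing : Prop := ∀ (instances : List (String × String)), Dom_further_processing instances → Pre_further_processing instances → Spec_further_processing instances (further_processing instances)

-- ===== LEMMAS AND PROOFS =====

-- every second element, starting at index 1 (A's odd-index comprehension, recursively)
def pvOdds {α : Type} : List α → List α
  | [] => []
  | [_] => []
  | _ :: b :: t => b :: pvOdds t

-- every fourth element, starting at index 3 (B's [3::4] slice, recursively)
def pvQ4 {α : Type} : List α → List α
  | [] => []
  | [_] => []
  | [_, _] => []
  | [_, _, _] => []
  | _ :: _ :: _ :: d :: t => d :: pvQ4 t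

theorem pvOdds_pvOdds {α : Type} (l : List α) : pvOdds (pvOdds l) = pvQ4 l := by
  induction l using pvQ4.induct with
  | case1 => rfl
  | case2 a => rfl
  | case3 a b => rfl
  | case4 a b c => rfl
  | case5 a b c d t ih => simp [pvOdds, pvQ4, ih]

theorem pvAuxNat {α : Type} (l : List α) (d : α) :
    ((List.range l.length).filter (fun k => k % 2 != 0)).map (fun k => l.getD k d)
      = pvOdds l := by
  induction l using pvOdds.induct with
  | case1 => rfl
  | case2 a => rfl
  | case3 a b t ih =>
    rw [show (a :: b :: t).length = t.length + 1 + 1 from rfl,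
        List.range_succ_eq_map, List.range_succ_eq_map, List.map_cons, List.map_map]
    simp only [List.filter_cons]
    have h0 : ((0 : Nat) % 2 != 0) = false := by decide
    have h1 : ((Nat.succ 0) % 2 != 0) = true := by decide
    rw [h0, h1]
    simp only [Bool.false_eq_true, if_false, if_true, List.map_cons]
    have h2 : (List.map (Nat.succ ∘ Nat.succ) (List.range t.length)).filter
          (fun k => k % 2 != 0)
        = List.map (Nat.succ ∘ Nat.succ) ((List.range t.length).filter (fun k => k % 2 != 0)) := by
      rw [List.filter_map]
      apply congrArg
      apply List.filter_congr
      intro k _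
      show ((Nat.succ (Nat.succ k)) % 2 != 0) = (k % 2 != 0)
      rw [show Nat.succ (Nat.succ k) % 2 = k % 2 from by omega]
    rw [h2, List.map_map]
    have h3 : ((List.range t.length).filter (fun k => k % 2 != 0)).map
          ((fun k => (a :: b :: t).getD k d) ∘ (Nat.succ ∘ Nat.succ))
        = ((List.range t.length).filter (fun k => k % 2 != 0)).map (fun k => t.getD k d) := by
      apply List.map_congr_left
      intro k _
      show (a :: b :: t).getD (Nat.succ (Nat.succ k)) d = t.getD k d
      simp
    rw [h3, ih]
    show b :: pvOdds t = pvOdds (a :: b :: t)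
    rfl

theorem pvOddA_eq_pvOdds (l : List String) :
    ((PySem.List.pyRange 0 (l.length : Int) 1).filter
        (fun i => PySem.Int.mod i 2 != 0)).map (fun i => PySem.List.pyGetD l i "")
      = pvOdds l := by
  rw [PySem.List.pyRange_zero_natCast, List.filter_map, List.map_map]
  have h1 : ((List.range l.length).filter ((fun i => PySem.Int.mod i 2 != 0) ∘ (fun k : Nat => (k : Int))))
      = (List.range l.length).filter (fun k => k % 2 != 0) := by
    apply List.filter_congr
    intro k _
    show (PySem.Int.mod (k : Int) 2 != 0) = (k % 2 != 0)
    rw [show PySem.Int.mod ((k : Nat) : Int) 2 = ((k % 2 : Nat) : Int) from by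
      exact_mod_cast PySem.Int.mod_natCast k 2]
    rcases Nat.mod_two_eq_zero_or_one k with h | h <;> simp [h]
  rw [h1]
  have h2 : ((List.range l.length).filter (fun k => k % 2 != 0)).map
        ((fun i => PySem.List.pyGetD l i "") ∘ (fun k : Nat => (k : Int)))
      = ((List.range l.length).filter (fun k => k % 2 != 0)).map (fun k => l.getD k "") := by
    apply List.map_congr_left
    intro k _
    exact PySem.List.pyGetD_natCast l k ""
  rw [h2]
  exact pvAuxNat l ""

theorem pvFilterMap_q4 {α : Type} (l : List α) :
    List.filterMap (fun k => l[3 + 4 * k]?) (List.range (l.length / 4)) = pvQ4 l := by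
  induction l using pvQ4.induct with
  | case1 => simp [pvQ4]
  | case2 a => simp [pvQ4]
  | case3 a b => simp [pvQ4]
  | case4 a b c => simp [pvQ4]
  | case5 a b c d t ih =>
    have hlen : (a :: b :: c :: d :: t).length / 4 = t.length / 4 + 1 := by
      rw [show (a :: b :: c :: d :: t).length = t.length + 4 from by simp]
      exact Nat.add_div_right _ (by norm_num)
    have hstep : List.filterMap (fun k => (a :: b :: c :: d :: t)[3 + 4 * k]?)
        (0 :: List.map Nat.succ (List.range (t.length / 4)))
      = d :: List.filterMap (fun k => (a :: b :: c :: d :: t)[3 + 4 * k]?)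
          (List.map Nat.succ (List.range (t.length / 4))) := rfl
    rw [hlen, List.range_succ_eq_map, hstep, List.filterMap_map]
    have hshift : List.filterMap ((fun k => (a :: b :: c :: d :: t)[3 + 4 * k]?) ∘ Nat.succ)
          (List.range (t.length / 4))
        = List.filterMap (fun k => t[3 + 4 * k]?) (List.range (t.length / 4)) := by
      apply List.filterMap_congr
      intro k _
      show (a :: b :: c :: d :: t)[3 + 4 * (Nat.succ k)]? = t[3 + 4 * k]?
      rw [show 3 + 4 * (Nat.succ k) = 3 + 4 * k + 1 + 1 + 1 + 1 from by omega]
      simp [List.getElem?_cons_succ]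
    rw [hshift, ih]
    rfl

theorem pvSliceKey (l : List String) :
    PySem.List.slice? l (some 3) none 4
      = some (List.filterMap (fun k => l[3 + 4 * k]?) (List.range (l.length / 4))) := by
  simp only [PySem.List.slice?, PySem.List.sliceIndices]
  norm_num
  rcases Nat.lt_or_ge l.length 4 with h | h
  · rw [if_neg (show ¬ 3 < l.length from by omega),
        show l.length / 4 = 0 from by omega]
    simp
  · rw [if_pos (show 3 < l.length from by omega)]
    have hcnt : (((l.length : Int) - min (3 : Int) (l.length : Int) + 4 - 1) / 4).toNat
        = l.length / 4 := by omega
    rw [hcnt]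
    apply List.filterMap_congr
    intro k _
    rw [show (min (3 : Int) (l.length : Int) + 4 * (k : Int)).toNat = 3 + 4 * k from by omega]

theorem pvSlice34 (l : List String) :
    (PySem.List.slice? l (some 3) none 4).getD [] = pvQ4 l := by
  rw [pvSliceKey, Option.getD_some, pvFilterMap_q4]

-- the per-key value A computes equals the one B computes
theorem pvPerValue (parts : List String) :
    ((PySem.List.pyRange 0 ((((PySem.List.pyRange 0 (parts.length : Int) 1).filter
          (fun i => PySem.Int.mod i 2 != 0)).map (fun i => PySem.List.pyGetD parts i "")).length : Int) 1).filter
        (fun i => PySem.Int.mod i 2 != 0)).map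
      (fun i => PySem.List.pyGetD (((PySem.List.pyRange 0 (parts.length : Int) 1).filter
          (fun i => PySem.Int.mod i 2 != 0)).map (fun i => PySem.List.pyGetD parts i "")) i "")
      = (PySem.List.slice? parts (some 3) none 4).getD [] := by
  rw [pvOddA_eq_pvOdds parts, pvOddA_eq_pvOdds (pvOdds parts), pvOdds_pvOdds, pvSlice34]

theorem pvMapFst_pvSetV (st : List (String × List String)) (k : String) (v : List String) :
    (pvSetV st k v).map Prod.fst = st.map Prod.fst := by
  induction st with
  | nil => rfl
  | cons p t ih =>
    simp only [pvSetV, List.map_cons] at ih ⊢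
    rw [show ((if (p.1 == k) = true then (k, v) else p).1) = p.1 from by
      by_cases hp : p.1 = k <;> simp [hp]]
    rw [ih]

theorem pvGetV_pvSetV_self (st : List (String × List String)) (k : String) (v : List String)
    (h : k ∈ st.map Prod.fst) : pvGetV (pvSetV st k v) k = v := by
  induction st with
  | nil => simp at h
  | cons p t ih =>
    obtain ⟨p1, p2⟩ := p
    by_cases hp : p1 = k
    · subst hp
      simp [pvSetV, pvGetV]
    · have hb : ((p1, p2).1 == k) = false := by simp [hp]
      have h1 : pvSetV ((p1, p2) :: t) k v = (p1, p2) :: pvSetV t k v := by simp [pvSetV, hp]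
      rw [h1]
      have h2 : pvGetV ((p1, p2) :: pvSetV t k v) k = pvGetV (pvSetV t k v) k := by
        simp [pvGetV, List.find?, hb]
      rw [h2]
      apply ih
      simp only [List.map_cons, List.mem_cons] at h
      exact h.resolve_left (fun e => hp e.symm)

theorem pvGetD_neg_one (l : List String) (lk : String) (h : l ≠ [])
    (hl : l.getLast? = some lk) : PySem.List.pyGetD l (-1) "" = lk := by
  have hn : 0 < l.length := by
    cases l with
    | nil => exact absurd rfl h
    | cons a t => simp
  have h1 : PySem.List.pyIdx? l.length (-1) = some (l.length - 1) := by
    simp only [PySem.List.pyIdx?]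
    rw [if_neg (by norm_num : ¬ (0 : Int) ≤ -1), if_pos (by omega : -(l.length : Int) ≤ -1)]
    norm_num
  simp only [PySem.List.pyGetD, PySem.List.pyGet?, h1]
  rw [show ((some (l.length - 1)).bind fun a => l[a]?) = l[l.length - 1]? from rfl]
  rw [← List.getLast?_eq_getElem?, hl]
  rfl

-- A's index loop (with the i = 0 wraparound read) equals B's fold carrying the previous value
theorem pvFill_eq (ks : List String) :
    ∀ (n i : Nat) (st : List (String × List String)) (prev : List String),
    i + n = ks.length → st.map Prod.fst = ks →
    prev = pvGetV st (PySem.List.pyGetD ks ((i : Int) - 1) "") →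
    (List.range' i n).foldl (fun st j =>
      if (pvGetV st (PySem.List.pyGetD ks ((j : Nat) : Int) "")).all (fun item => item == "") then
        pvSetV st (PySem.List.pyGetD ks ((j : Nat) : Int) "")
          (pvGetV st (PySem.List.pyGetD ks (((j : Nat) : Int) - 1) ""))
      else st) st
    = ((ks.drop i).foldl (fun sp k =>
        if (pvGetV sp.1 k).all (fun item => item == "") then (pvSetV sp.1 k sp.2, sp.2)
        else (sp.1, pvGetV sp.1 k)) (st, prev)).1 := by
  intro n
  induction n with
  | zero =>
    intro i st prev hlen hfst hprev
    have hi : i = ks.length := by omega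
    subst hi
    simp [List.drop_length]
  | succ n ih =>
    intro i st prev hlen hfst hprev
    have hi : i < ks.length := by omega
    have hk : PySem.List.pyGetD ks ((i : Nat) : Int) "" = ks[i] := by
      rw [PySem.List.pyGetD_natCast]
      exact List.getD_eq_getElem ks "" hi
    have hmem : ks[i] ∈ st.map Prod.fst := by
      rw [hfst]; exact List.getElem_mem hi
    rw [List.range'_succ, ← List.getElem_cons_drop hi]
    simp only [List.foldl_cons]
    rw [hk, ← hprev]
    have hcast : (((i + 1 : Nat)) : Int) - 1 = ((i : Nat) : Int) := by push_cast; ring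
    by_cases hc : (pvGetV st ks[i]).all (fun item => item == "") = true
    · rw [if_pos hc, if_pos hc]
      apply ih (i + 1) (pvSetV st ks[i] prev) prev (by omega)
      · rw [pvMapFst_pvSetV]; exact hfst
      · rw [hcast, hk, pvGetV_pvSetV_self _ _ _ hmem]
    · rw [if_neg hc, if_neg hc]
      apply ih (i + 1) st (pvGetV st ks[i]) (by omega) hfst
      rw [hcast, hk]

-- the whole fill stage: A's pyRange/index loop equals B's getLast?-seeded fold
theorem pvFillStage (res : List (String × List String)) :
    (PySem.List.pyRange 0 (((res.map Prod.fst).length : Nat) : Int) 1).foldl (fun st i =>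
      if (pvGetV st (PySem.List.pyGetD (res.map Prod.fst) i "")).all (fun item => item == "") then
        pvSetV st (PySem.List.pyGetD (res.map Prod.fst) i "")
          (pvGetV st (PySem.List.pyGetD (res.map Prod.fst) (i - 1) ""))
      else st) res
    = (match (res.map Prod.fst).getLast? with
      | none => res
      | some lk =>
        (((res.map Prod.fst).foldl (fun sp k =>
          if (pvGetV sp.1 k).all (fun item => item == "") then (pvSetV sp.1 k sp.2, sp.2)
          else (sp.1, pvGetV sp.1 k)) (res, pvGetV res lk)).1)) := by
  cases hl : (res.map Prod.fst).getLast? with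
  | none =>
    have hres : res = [] := by
      have := List.getLast?_eq_none_iff.mp hl
      exact List.map_eq_nil_iff.mp this
    subst hres
    rfl
  | some lk =>
    have hne : res.map Prod.fst ≠ [] := by
      intro hcontra
      rw [hcontra] at hl
      simp at hl
    rw [PySem.List.pyRange_zero_natCast, List.foldl_map, List.range_eq_range']
    have := pvFill_eq (res.map Prod.fst) (res.map Prod.fst).length 0 res (pvGetV res lk)
      (by omega) rfl
      (by
        rw [show (((0 : Nat)) : Int) - 1 = (-1 : Int) from by norm_num]
        rw [pvGetD_neg_one _ lk hne hl])
    rw [List.drop_zero] at this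
    exact this

-- ===== VERDICT (by name: the statement is the Claim_ definition above) =====
theorem further_processing_spec : Claim_equal_further_processing := by
  intro instances _hDom _hPre
  show further_processing instances = further_processing_alt instances
  have hABfold :
      (((instances.map (fun kv => (kv.1, PySem.List.slice (PySem.Str.split₀ kv.2) (some 1) none))).map
          (fun kv => (kv.1, PySem.Str.join " " kv.2))).map
        (fun kv =>
          (kv.1, ((PySem.List.pyRange 0 ((((PySem.Str.split? kv.2 "'").getD []).length : Int)) 1).filter
              (fun i => PySem.Int.mod i 2 != 0)).map
            (fun i => PySem.List.pyGetD ((PySem.Str.split? kv.2 "'").getD []) i "")))).map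
        (fun kv =>
          (kv.1, ((PySem.List.pyRange 0 ((kv.2.length : Int)) 1).filter
              (fun i => PySem.Int.mod i 2 != 0)).map (fun i => PySem.List.pyGetD kv.2 i "")))
      = instances.map (fun kv =>
          (kv.1, (PySem.List.slice? ((PySem.Str.split? (PySem.Str.join " "
              (PySem.List.slice (PySem.Str.split₀ kv.2) (some 1) none)) "'").getD [])
            (some 3) none 4).getD [])) := by
    rw [List.map_map, List.map_map, List.map_map]
    apply List.map_congr_left
    intro kv _
    simp only [Function.comp_apply]
    exact congrArg (fun z => ((kv.1 : String), z)) (pvPerValue _)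
  simp only [further_processing, further_processing_alt, hABfold]
  exact pvFillStage _
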